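-- pv_equiv track=rewrite | github.com/sebastianmorta/opt | randomgen.py | QAP
-- ===== SOURCE A (Python) =====
-- import math
--
-- class RandomNumberGenerator:
--     def __init__(self, seedVaule=None):
--         self.__seed = seedVaule
--
--     def nextInt(self, low, high):
--         m = 2147483647
--         a = 16807
--         b = 127773
--         c = 2836
--         k = int(self.__seed / b)
--         self.__seed = a * (self.__seed % b) - k * c
--         if self.__seed < 0:
--             self.__seed = self.__seed + m
--         value_0_1 = self.__seed
--         value_0_1 = value_0_1 / m
--         return low + int(math.floor(value_0_1 * (high - low + 1)))
--
--     def nextFloat(self, low, high):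
--         low *= 100000
--         high *= 100000
--         val = self.nextInt(low, high) / 100000.0
--         return val
--
-- def QAP(n, seed):
--     generator = RandomNumberGenerator(seed)
--     w = []
--     d = []
--     for i in range(n):
--         w.append([generator.nextInt(1, 50) for j in range(n)])
--         d.append([generator.nextInt(1, 50) for j in range(n)])
--     return w, d
-- ===== SOURCE B (Python) =====
-- import math
--
-- class RandomNumberGenerator:
--     def __init__(self, seedVaule=None):
--         self.__seed = seedVaule
--
--     def nextInt(self, low, high):
--         m = 2147483647
--         a = 16807
--         b = 127773
--         c = 2836
--         k = int(self.__seed / b)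
--         self.__seed = a * (self.__seed % b) - k * c
--         if self.__seed < 0:
--             self.__seed = self.__seed + m
--         value_0_1 = self.__seed
--         value_0_1 = value_0_1 / m
--         return low + int(math.floor(value_0_1 * (high - low + 1)))
--
--     def nextFloat(self, low, high):
--         low *= 100000
--         high *= 100000
--         val = self.nextInt(low, high) / 100000.0
--         return val
--
-- def QAP(n, seed):
--     # one flat generation pass (same RNG call order), then reshape by slicing
--     generator = RandomNumberGenerator(seed)
--     m = max(n, 0)
--     flat = [generator.nextInt(1, 50) for _ in range(2 * m * m)]
--     w = [flat[i * 2 * n : i * 2 * n + n] for i in range(n)]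
--     d = [flat[i * 2 * n + n : (i + 1) * (2 * n)] for i in range(n)]
--     return w, d
-- ===== Notes on version B (the rewrite author's own statement) =====
-- stated objective: alternative
-- what changed: B keeps the RNG byte-identical but replaces A's per-row interleaved list building by one flat generation pass of all 2*n*n values (same call order) followed by a separate reshape pass that slices the flat list into the two n-by-n matrices.
import Mathlib
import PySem

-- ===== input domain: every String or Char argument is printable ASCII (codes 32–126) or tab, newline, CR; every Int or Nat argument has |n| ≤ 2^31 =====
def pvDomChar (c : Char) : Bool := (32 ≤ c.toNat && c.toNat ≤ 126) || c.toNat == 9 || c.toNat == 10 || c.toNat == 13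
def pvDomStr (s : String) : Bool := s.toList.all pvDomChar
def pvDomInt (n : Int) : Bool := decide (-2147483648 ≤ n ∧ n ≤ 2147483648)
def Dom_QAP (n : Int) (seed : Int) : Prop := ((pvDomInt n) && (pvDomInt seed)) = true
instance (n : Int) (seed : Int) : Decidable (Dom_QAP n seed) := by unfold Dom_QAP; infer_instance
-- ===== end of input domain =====

-- B changes only the decomposition (flat generation pass + reshape-by-slices instead of
-- per-row interleaved list building); the theorems state return-value equality on all inputs.

-- ===== PORT A =====
-- RandomNumberGenerator.nextInt, threaded state style: takes the current seed, returns
-- (new seed, drawn value).  The two float steps of the Python are ported as exact integer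
-- arithmetic, which agrees with the float computation on the whole |seed| ≤ 2^31 domain:
--   int(seed / b)  →  Int.tdiv seed b   (float quotient never crosses an integer boundary here)
--   low + int(math.floor((seed/m) * (high-low+1)))  →  low + (seed*(high-low+1)).floordiv m
--     (the two float roundings are ≪ the 1/m distance to the nearest boundary).
def pvNextInt (seed low high : Int) : Int × Int :=
  let m : Int := 2147483647
  let a : Int := 16807
  let b : Int := 127773
  let c : Int := 2836
  let k : Int := Int.tdiv seed b
  let s1 : Int := a * (PySem.Int.mod seed b) - k * c
  let s2 : Int := if s1 < 0 then s1 + m else s1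
  (s2, low + PySem.Int.floordiv (s2 * (high - low + 1)) m)

-- one step of '[generator.nextInt(1, 50) for j in range(n)]'
def pvRowStep (p : Int × List Int) (_ : Int) : Int × List Int :=
  let q := pvNextInt p.1 1 50
  (q.1, p.2 ++ [q.2])

-- one iteration of A's 'for i in range(n)' body: append a w-row, then a d-row
def pvOuterStep (n : Int) (st : Int × List (List Int) × List (List Int)) (_ : Int) :
    Int × List (List Int) × List (List Int) :=
  let r1 := (PySem.List.pyRange 0 n 1).foldl pvRowStep (st.1, [])
  let r2 := (PySem.List.pyRange 0 n 1).foldl pvRowStep (r1.1, [])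
  (r2.1, st.2.1 ++ [r1.2], st.2.2 ++ [r2.2])

def QAP (n : Int) (seed : Int) : List (List Int) × List (List Int) :=
  let r := (PySem.List.pyRange 0 n 1).foldl (pvOuterStep n) (seed, [], [])
  (r.2.1, r.2.2)

-- ===== PORT B =====
def QAP_alt (n : Int) (seed : Int) : List (List Int) × List (List Int) :=
  let m := max n 0
  let flat := ((PySem.List.pyRange 0 (2 * m * m) 1).foldl pvRowStep (seed, [])).2
  let w := (PySem.List.pyRange 0 n 1).map
    (fun i => PySem.List.slice flat (some (i * 2 * n)) (some (i * 2 * n + n)))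
  let d := (PySem.List.pyRange 0 n 1).map
    (fun i => PySem.List.slice flat (some (i * 2 * n + n)) (some ((i + 1) * (2 * n))))
  (w, d)

-- ===== PRECONDITION & SPEC =====
def Spec_QAP (n : Int) (seed : Int) (out : List (List Int) × List (List Int)) : Prop := out = QAP_alt n seed
instance (n : Int) (seed : Int) (out : List (List Int) × List (List Int)) : Decidable (Spec_QAP n seed out) := by unfold Spec_QAP; infer_instance

-- ===== CLAIM (what is proved, stated in full; the proofs are below) =====
def Claim_equal_QAP : Prop := ∀ (n : Int) (seed : Int), Dom_QAP n seed → Spec_QAP n seed (QAP n seed)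

-- ===== LEMMAS AND PROOFS =====

-- proof-side model: k sequential draws of nextInt(1,50) from state s
def pvGen : Int → Nat → Int × List Int
  | s, 0 => (s, [])
  | s, k+1 =>
    let q := pvNextInt s 1 50
    let r := pvGen q.1 k
    (r.1, q.2 :: r.2)

-- proof-side model of A: k rows of w and d, each of length N
def pvGenRows (N : Nat) : Int → Nat → Int × List (List Int) × List (List Int)
  | s, 0 => (s, [], [])
  | s, k+1 =>
    let r1 := pvGen s N
    let r2 := pvGen r1.1 N
    let rest := pvGenRows N r2.1 k
    (rest.1, r1.2 :: rest.2.1, r2.2 :: rest.2.2)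

theorem pvGen_length (s : Int) (k : Nat) : (pvGen s k).2.length = k := by
  induction k generalizing s with
  | zero => rfl
  | succ k ih => simp [pvGen, ih]

theorem pvGen_add (j k : Nat) (s : Int) :
    pvGen s (j + k) = ((pvGen (pvGen s j).1 k).1, (pvGen s j).2 ++ (pvGen (pvGen s j).1 k).2) := by
  induction j generalizing s with
  | zero => simp [pvGen]
  | succ j ih =>
    have h : j + 1 + k = (j + k) + 1 := by omega
    rw [h]
    simp only [pvGen, ih]
    simp

theorem foldl_row (l : List Int) (s : Int) (acc : List Int) :
    l.foldl pvRowStep (s, acc) = ((pvGen s l.length).1, acc ++ (pvGen s l.length).2) := by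
  induction l generalizing s acc with
  | nil => simp [pvGen]
  | cons a l ih =>
    simp only [List.foldl_cons]
    rw [show pvRowStep (s, acc) a = ((pvNextInt s 1 50).1, acc ++ [(pvNextInt s 1 50).2]) from rfl, ih]
    simp [pvGen]

theorem foldl_outer (N : Nat) (l : List Int) (s : Int) (w d : List (List Int)) :
    l.foldl (pvOuterStep (N : Int)) (s, w, d) =
      ((pvGenRows N s l.length).1,
       w ++ (pvGenRows N s l.length).2.1,
       d ++ (pvGenRows N s l.length).2.2) := by
  induction l generalizing s w d with
  | nil => simp [pvGenRows]
  | cons a l ih =>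
    simp only [List.foldl_cons, List.length_cons]
    rw [show pvOuterStep (N : Int) (s, w, d) a =
        (((pvGen (pvGen s N).1 N).1),
         w ++ [(pvGen s N).2], d ++ [(pvGen (pvGen s N).1 N).2]) from by
      show (let r1 := (PySem.List.pyRange 0 (N : Int) 1).foldl pvRowStep ((s, w, d).1, []);
            let r2 := (PySem.List.pyRange 0 (N : Int) 1).foldl pvRowStep (r1.1, []);
            (r2.1, (s, w, d).2.1 ++ [r1.2], (s, w, d).2.2 ++ [r2.2])) = _
      simp only [foldl_row, PySem.List.length_pyRange_one]
      simp]
    rw [ih]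
    simp [pvGenRows]

theorem QAP_char (N : Nat) (seed : Int) :
    QAP (N : Int) seed = ((pvGenRows N seed N).2.1, (pvGenRows N seed N).2.2) := by
  simp [QAP, foldl_outer, PySem.List.length_pyRange_one]

theorem sliceW (N : Nat) : ∀ (k : Nat) (s : Int),
    (List.range k).map (fun j =>
      PySem.List.slice (pvGen s (2 * N * k)).2
        (some ((j * (2 * N) : Nat) : Int)) (some (((j * (2 * N) : Nat) : Int) + (N : Int))))
      = (pvGenRows N s k).2.1 := by
  intro k
  induction k with
  | zero => intro s; simp [pvGenRows]
  | succ k ih =>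
    intro s
    have hL : (pvGen s N).2.length = N := pvGen_length _ _
    have hL2 : (pvGen (pvGen s N).1 N).2.length = N := pvGen_length _ _
    have hsplit : 2 * N * (k + 1) = N + (N + 2 * N * k) := by ring
    have hflat : (pvGen s (2 * N * (k + 1))).2
        = ((pvGen s N).2 ++ (pvGen (pvGen s N).1 N).2)
          ++ (pvGen (pvGen (pvGen s N).1 N).1 (2 * N * k)).2 := by
      rw [hsplit, pvGen_add N (N + 2 * N * k) s]
      simp only
      rw [pvGen_add N (2 * N * k) _]
      simp [List.append_assoc]
    rw [List.range_succ_eq_map, List.map_cons, List.map_map]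
    have hrows : (pvGenRows N s (k + 1)).2.1
        = (pvGen s N).2 :: (pvGenRows N (pvGen (pvGen s N).1 N).1 k).2.1 := by
      simp [pvGenRows]
    rw [hrows]
    congr 1
    · simp only [Nat.zero_mul, Nat.cast_zero, zero_add]
      rw [hflat, PySem.List.slice_zero_start, PySem.List.slice_to_natCast,
        List.append_assoc, List.take_left' hL]
    · have hfun : ∀ j, j ∈ List.range k →
          ((fun j => PySem.List.slice (pvGen s (2 * N * (k + 1))).2
              (some ((j * (2 * N) : Nat) : Int)) (some (((j * (2 * N) : Nat) : Int) + (N : Int)))) ∘ Nat.succ) j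
          = (fun j => PySem.List.slice (pvGen (pvGen (pvGen s N).1 N).1 (2 * N * k)).2
              (some ((j * (2 * N) : Nat) : Int)) (some (((j * (2 * N) : Nat) : Int) + (N : Int)))) j := by
        intro j _
        simp only [Function.comp]
        rw [hflat, PySem.List.slice_natCast_add, PySem.List.slice_natCast_add]
        have hidx : (Nat.succ j) * (2 * N)
            = ((pvGen s N).2 ++ (pvGen (pvGen s N).1 N).2).length + j * (2 * N) := by
          simp only [List.length_append, hL, hL2, Nat.succ_eq_add_one]; ring
        rw [hidx, List.drop_length_add_append]
      rw [List.map_congr_left hfun]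
      exact ih _

theorem sliceD (N : Nat) : ∀ (k : Nat) (s : Int),
    (List.range k).map (fun j =>
      PySem.List.slice (pvGen s (2 * N * k)).2
        (some ((j * (2 * N) + N : Nat) : Int)) (some (((j * (2 * N) + N : Nat) : Int) + (N : Int))))
      = (pvGenRows N s k).2.2 := by
  intro k
  induction k with
  | zero => intro s; simp [pvGenRows]
  | succ k ih =>
    intro s
    have hL : (pvGen s N).2.length = N := pvGen_length _ _
    have hL2 : (pvGen (pvGen s N).1 N).2.length = N := pvGen_length _ _
    have hsplit : 2 * N * (k + 1) = N + (N + 2 * N * k) := by ring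
    have hflat : (pvGen s (2 * N * (k + 1))).2
        = ((pvGen s N).2 ++ (pvGen (pvGen s N).1 N).2)
          ++ (pvGen (pvGen (pvGen s N).1 N).1 (2 * N * k)).2 := by
      rw [hsplit, pvGen_add N (N + 2 * N * k) s]
      simp only
      rw [pvGen_add N (2 * N * k) _]
      simp [List.append_assoc]
    rw [List.range_succ_eq_map, List.map_cons, List.map_map]
    have hrows : (pvGenRows N s (k + 1)).2.2
        = (pvGen (pvGen s N).1 N).2 :: (pvGenRows N (pvGen (pvGen s N).1 N).1 k).2.2 := by
      simp [pvGenRows]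
    rw [hrows]
    congr 1
    · simp only [Nat.zero_mul, Nat.zero_add]
      rw [hflat, PySem.List.slice_natCast_add, List.append_assoc, List.drop_left' hL,
        List.take_left' hL2]
    · have hfun : ∀ j, j ∈ List.range k →
          ((fun j => PySem.List.slice (pvGen s (2 * N * (k + 1))).2
              (some ((j * (2 * N) + N : Nat) : Int)) (some (((j * (2 * N) + N : Nat) : Int) + (N : Int)))) ∘ Nat.succ) j
          = (fun j => PySem.List.slice (pvGen (pvGen (pvGen s N).1 N).1 (2 * N * k)).2
              (some ((j * (2 * N) + N : Nat) : Int)) (some (((j * (2 * N) + N : Nat) : Int) + (N : Int)))) j := by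
        intro j _
        simp only [Function.comp]
        rw [hflat, PySem.List.slice_natCast_add, PySem.List.slice_natCast_add]
        have hidx : (Nat.succ j) * (2 * N) + N
            = ((pvGen s N).2 ++ (pvGen (pvGen s N).1 N).2).length + (j * (2 * N) + N) := by
          simp only [List.length_append, hL, hL2, Nat.succ_eq_add_one]; ring
        rw [hidx, List.drop_length_add_append]
      rw [List.map_congr_left hfun]
      exact ih _

theorem QAP_alt_char (N : Nat) (seed : Int) :
    QAP_alt (N : Int) seed = ((pvGenRows N seed N).2.1, (pvGenRows N seed N).2.2) := by
  have hmax : max ((N : Nat) : Int) 0 = ((N : Nat) : Int) := by simp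
  have hcast : (2 * (N : Int) * N - 0) = ((2 * N * N : Nat) : Int) := by push_cast; ring
  have hlen : (PySem.List.pyRange 0 (2 * (N : Int) * N) 1).length = 2 * N * N := by
    rw [PySem.List.length_pyRange_one, hcast, Int.toNat_natCast]
  have hrange : PySem.List.pyRange 0 (N : Int) 1 = (List.range N).map (fun j => ((j : Nat) : Int)) := by
    rw [PySem.List.pyRange_one]; simp
  simp only [QAP_alt, hmax, foldl_row, hlen, hrange, List.map_map]
  refine Prod.ext ?_ ?_ <;> simp only
  · rw [← sliceW N N seed]
    refine List.map_congr_left ?_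
    intro j _
    simp only [Function.comp]
    have h1 : ((j : Nat) : Int) * 2 * (N : Int) = ((j * (2 * N) : Nat) : Int) := by push_cast; ring
    simp only [h1, List.nil_append]
  · rw [← sliceD N N seed]
    refine List.map_congr_left ?_
    intro j _
    simp only [Function.comp]
    have h1 : ((j : Nat) : Int) * 2 * (N : Int) + (N : Int) = ((j * (2 * N) + N : Nat) : Int) := by
      push_cast; ring
    simp only [h1, List.nil_append]
    rw [show (((j : Nat) : Int) + 1) * (2 * (N : Int))
        = ((j * (2 * N) + N : Nat) : Int) + (N : Int) from by push_cast; ring]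

-- ===== VERDICT (by name: the statement is the Claim_ definition above) =====
theorem QAP_spec : Claim_equal_QAP := by
  intro n seed _
  unfold Spec_QAP
  by_cases h : n ≤ 0
  · have hnil : PySem.List.pyRange 0 n 1 = [] := PySem.List.pyRange_one_eq_nil (by omega)
    simp [QAP, QAP_alt, hnil]
  · have hN : n = ((n.toNat : Nat) : Int) := by omega
    rw [hN, QAP_char, QAP_alt_char]
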